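-- pv_equiv track=rewrite | github.com/stevehan00/Algorithm | contests/Dev_Day(2020)/d.py | solution
-- ===== SOURCE A (Python) =====
-- from collections import defaultdict
-- import heapq
--
-- def solution(s1, s2, k):
--
--     parent = defaultdict(set)
--     graph = defaultdict(set)
--
--     for i in range(len(s1)):
--         graph[s1[i]].add(s2[i])
--         parent[s2[i]].add(s1[i])
--
--     find = [k]
--     road = set()
--     p = set()
--
--     while find:
--         cur = find.pop()
--
--         road.add(cur)
--
--         if len(parent[cur]) == 0:
--             p.add(cur)
--
--         for c in parent[cur]:
--             find.append(c)
--
--     q = []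
--     path = [] # answer
--     visit = set()
--
--     for c in p:
--         heapq.heappush(q, c)
--
--     while q:
--         cur = heapq.heappop(q)
--         visit.add(cur)
--         path.append(cur)
--
--         if cur == k:
--             break
--
--         for c in graph[cur]:
--             flag = True
--
--             if c not in visit and c in road:
--                 for g in parent[c]:
--                     if g not in visit:
--                         flag = False
--                         break
--
--                 if flag:
--                     heapq.heappush(q, c)
--
--     return path
-- ===== SOURCE B (Python) =====
-- def solution(s1, s2, k):
--     parent = {}
--     for a, b in zip(s1, s2):
--         parent.setdefault(b, set()).add(a)
--
--     # ancestors of k (each node expanded once)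
--     road = {k}
--     stack = [k]
--     while stack:
--         cur = stack.pop()
--         for c in parent.get(cur, ()):
--             if c not in road:
--                 road.add(c)
--                 stack.append(c)
--
--     order = sorted(road)
--     path = []
--     visited = set()
--     for _ in range(len(order)):
--         nxt = None
--         for c in order:
--             if c not in visited and all(g in visited for g in parent.get(c, ())):
--                 nxt = c
--                 break
--         if nxt is None:
--             break
--         visited.add(nxt)
--         path.append(nxt)
--         if nxt == k:
--             break
--     return path
-- ===== Notes on version B (the rewrite author's own statement) =====
-- stated objective: simpler
-- what changed: B finds the ancestor set of k with a seen-set DFS (each node expanded once, instead of A's stack that re-pushes parents unconditionally and re-visits nodes once per path) and then emits the lexicographic topological order by repeatedly scanning the sorted ancestor list for the first unvisited node whose parents are all visited, with no heap, no source set and no separate visited-flag rescan bookkeeping.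
import Mathlib
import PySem

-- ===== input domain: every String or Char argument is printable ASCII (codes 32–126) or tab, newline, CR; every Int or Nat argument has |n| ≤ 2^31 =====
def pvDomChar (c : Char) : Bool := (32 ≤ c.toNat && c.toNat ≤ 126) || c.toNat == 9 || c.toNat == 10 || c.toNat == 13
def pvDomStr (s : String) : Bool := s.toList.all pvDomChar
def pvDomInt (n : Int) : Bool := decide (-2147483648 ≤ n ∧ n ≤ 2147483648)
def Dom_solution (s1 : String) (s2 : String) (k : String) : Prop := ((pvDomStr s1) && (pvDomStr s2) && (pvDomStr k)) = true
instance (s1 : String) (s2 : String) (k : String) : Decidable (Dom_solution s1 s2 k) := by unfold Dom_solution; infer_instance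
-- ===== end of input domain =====

-- B re-implements A (lexicographically smallest topological order of the ancestor subgraph of k)
-- with a seen-set DFS for the ancestor set instead of A's re-visiting stack, and a min-ready scan
-- over the sorted ancestor list instead of A's heap with parent rescans; objective: simpler.
-- Both Pythons only read their dicts/sets in order-insensitive ways, so ports use PySem.Set order.
-- A's heapq is a library call; it is ported as a sorted-list priority queue (heappush = ordered
-- insert, heappop = head), which returns exactly the values Python's heappop returns.

-- shared input parsing: the i-th edge is s1[i] -> s2[i] (Python one-char strings)
def pvChars (s : String) : List String := s.toList.map (fun c => String.singleton c)

-- pairs (s1[i], s2[i]) for i in range(len(s1)); exact when len(s1) ≤ len(s2) (in Pre_);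
-- for len(s2) < len(s1) Python A raises IndexError (excluded by Pre_, see Raises_)
def pvPairs (s1 s2 : String) : List (String × String) := List.zip (pvChars s1) (pvChars s2)

-- defaultdict(set) lookup: missing key = empty set (A's reads never depend on the inserted defaults)
def pvP (d : PySem.Dict String (PySem.Set String)) (v : String) : List String := d.getD v []

-- ===== PORT A =====
-- for i in range(len(s1)): graph[s1[i]].add(s2[i]); parent[s2[i]].add(s1[i])
def pvBuildA (ps : List (String × String)) :
    PySem.Dict String (PySem.Set String) × PySem.Dict String (PySem.Set String) :=
  ps.foldl (fun gp p =>
      (gp.1.modify p.1 [] (fun s => PySem.Set.add s p.2),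
       gp.2.modify p.2 [] (fun s => PySem.Set.add s p.1)))
    (PySem.Dict.empty, PySem.Dict.empty)

-- while find: cur = find.pop(); road.add(cur); if len(parent[cur])==0: p.add(cur); push parents.
-- The Python loop terminates exactly on Pre_'s acyclic inputs; the fuel only makes the port total
-- and is proved never to run out under Pre_.
def pvFindLoop (pd : PySem.Dict String (PySem.Set String)) :
    Nat → List String → PySem.Set String → PySem.Set String → PySem.Set String × PySem.Set String
  | fuel, find, road, p =>
    match find with
    | [] => (road, p)
    | cur :: rest =>
      match fuel with
      | 0 => (road, p)
      | f + 1 =>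
        let road' := PySem.Set.add road cur
        let p' := if (pvP pd cur).length == 0 then PySem.Set.add p cur else p
        pvFindLoop pd f ((pvP pd cur).foldl (fun st c => c :: st) rest) road' p'

-- heapq.heappush on a sorted-list priority queue
def pvHeapPush (q : List String) (c : String) : List String := List.orderedInsert (· ≤ ·) c q

-- the second while loop of A (heappop = take the head of the sorted queue)
def pvLoop2 (gd pd : PySem.Dict String (PySem.Set String)) (road : PySem.Set String) (k : String) :
    Nat → List String → PySem.Set String → List String → List String
  | fuel, q, visit, path =>
    match q with
    | [] => path
    | cur :: qrest =>
      match fuel with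
      | 0 => path
      | f + 1 =>
        let visit' := PySem.Set.add visit cur
        let path' := path ++ [cur]
        if cur == k then path'
        else
          pvLoop2 gd pd road k f
            ((pvP gd cur).foldl (fun qq c =>
                if (!PySem.Set.contains visit' c && PySem.Set.contains road c)
                    && (pvP pd c).all (fun g => PySem.Set.contains visit' g)
                then pvHeapPush qq c else qq) qrest)
            visit' path'

def solution (s1 : String) (s2 : String) (k : String) : List String :=
  let gp := pvBuildA (pvPairs s1 s2)
  let rp := pvFindLoop gp.2 ((s1.toList.length + 2) ^ (s1.toList.length + 2)) [k] [] []
  let q0 := rp.2.foldl (fun q c => pvHeapPush q c) []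
  pvLoop2 gp.1 gp.2 rp.1 k (s1.toList.length + 2) q0 [] []

-- ===== PORT B =====
-- parent.setdefault(b, set()).add(a) for a, b in zip(s1, s2)
def pvParentB (ps : List (String × String)) : PySem.Dict String (PySem.Set String) :=
  ps.foldl (fun d p => d.modify p.2 [] (fun s => PySem.Set.add s p.1)) PySem.Dict.empty

-- ancestors of k, each node expanded once (stack DFS with a seen set); always terminates in
-- Python, the fuel (enough for one push per distinct node) only makes the port total
def pvDfs (pd : PySem.Dict String (PySem.Set String)) :
    Nat → List String → PySem.Set String → PySem.Set String
  | fuel, stack, seen =>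
    match stack with
    | [] => seen
    | cur :: rest =>
      match fuel with
      | 0 => seen
      | f + 1 =>
        let ss := (pvP pd cur).foldl (fun (ss : List String × PySem.Set String) c =>
            if PySem.Set.contains ss.2 c then ss else (c :: ss.1, PySem.Set.add ss.2 c))
          (rest, seen)
        pvDfs pd f ss.1 ss.2

-- for _ in range(len(order)): take the first unvisited node of the sorted list whose parents
-- are all visited; stop on no candidate or after taking k
def pvScan (pd : PySem.Dict String (PySem.Set String)) (k : String) (order : List String) :
    Nat → PySem.Set String → List String → List String
  | 0, _, path => path
  | f + 1, visited, path =>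
    match order.find? (fun c => !PySem.Set.contains visited c
        && (pvP pd c).all (fun g => PySem.Set.contains visited g)) with
    | none => path
    | some c =>
      let path' := path ++ [c]
      if c == k then path' else pvScan pd k order f (PySem.Set.add visited c) path'

def solution_alt (s1 : String) (s2 : String) (k : String) : List String :=
  let pd := pvParentB (pvPairs s1 s2)
  let road := pvDfs pd (s1.toList.length + 2) [k] (PySem.Set.add PySem.Set.empty k)
  let order := PySem.List.sorted road (fun x => x) false
  pvScan pd k order order.length PySem.Set.empty []

-- ===== PRECONDITION & SPEC =====
-- mathematical ancestor closure used only to STATE Pre_: saturate "add all parents" (a plain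
-- bounded fixpoint, not either port's traversal); after |s1|+1 rounds it is stable
def pvSatStep (pd : PySem.Dict String (PySem.Set String)) (S : PySem.Set String) : PySem.Set String :=
  S.foldl (fun acc v => PySem.Set.update acc (pvP pd v)) S

def pvSat (pd : PySem.Dict String (PySem.Set String)) : Nat → PySem.Set String → PySem.Set String
  | 0, S => S
  | n + 1, S => pvSat pd n (pvSatStep pd S)

def pvClosure (pd : PySem.Dict String (PySem.Set String)) (n : Nat) (v : String) : PySem.Set String :=
  pvSat pd (n + 1) [v]

-- Pre_ = exactly the inputs on which Python A returns: len(s1) ≤ len(s2) (otherwise A raises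
-- IndexError), and no ancestor of k lies on a directed cycle (otherwise A's first while loop,
-- which re-pushes parents unconditionally, never terminates).
def Pre_solution (s1 : String) (s2 : String) (k : String) : Prop :=
  s1.toList.length ≤ s2.toList.length ∧
  ∀ v ∈ pvClosure (pvParentB (pvPairs s1 s2)) s1.toList.length k,
    ∀ u ∈ pvP (pvParentB (pvPairs s1 s2)) v,
      v ∉ pvClosure (pvParentB (pvPairs s1 s2)) s1.toList.length u

instance (s1 : String) (s2 : String) (k : String) : Decidable (Pre_solution s1 s2 k) := by
  unfold Pre_solution; infer_instance

def pvWitness_solution : String × String × String := ("ab", "bc", "c")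

def Spec_solution (s1 : String) (s2 : String) (k : String) (out : List String) : Prop :=
  out = solution_alt s1 s2 k

instance (s1 : String) (s2 : String) (k : String) (out : List String) :
    Decidable (Spec_solution s1 s2 k out) := by unfold Spec_solution; infer_instance

-- ===== CLAIM (what is proved, stated in full; the proofs are below) =====
def Claim_equal_solution : Prop := ∀ (s1 : String) (s2 : String) (k : String),
  Dom_solution s1 s2 k → Pre_solution s1 s2 k → Spec_solution s1 s2 k (solution s1 s2 k)

-- ===== LEMMAS AND PROOFS =====

-- u is an ancestor of v (u = v or a parent-edge path leads from u down to v)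
inductive pvReach (pd : PySem.Dict String (PySem.Set String)) : String → String → Prop
  | refl (v : String) : pvReach pd v v
  | step {u w v : String} : u ∈ pvP pd w → pvReach pd w v → pvReach pd u v

lemma pv_reach_snoc {pd : PySem.Dict String (PySem.Set String)} {u w v : String}
    (h : pvReach pd u w) (hw : w ∈ pvP pd v) : pvReach pd u v := by
  induction h generalizing v with
  | refl => exact pvReach.step hw (pvReach.refl v)
  | step h1 _ ih => exact pvReach.step h1 (ih hw)

lemma pv_reach_snoc_inv {pd : PySem.Dict String (PySem.Set String)} {u v : String}
    (h : pvReach pd u v) : u = v ∨ ∃ w ∈ pvP pd v, pvReach pd u w := by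
  induction h with
  | refl => exact Or.inl rfl
  | step h1 _ ih =>
    rcases ih with rfl | ⟨x, hx, hrx⟩
    · exact Or.inr ⟨_, h1, pvReach.refl _⟩
    · exact Or.inr ⟨x, hx, pvReach.step h1 hrx⟩

-- any set containing t and closed under parents contains every ancestor of t
lemma pv_reach_closed {pd : PySem.Dict String (PySem.Set String)} {C : List String} {t : String}
    (hcl : ∀ v ∈ C, ∀ u ∈ pvP pd v, u ∈ C) {w : String}
    (h : pvReach pd w t) (ht : t ∈ C) : w ∈ C := by
  induction h with
  | refl => exact ht
  | step h1 _ ih => exact hcl _ (ih ht) _ h1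

-- generic list facts specialised to our loops
lemma pv_foldl_cons_eq (L rest : List String) :
    L.foldl (fun st c => c :: st) rest = L.reverse ++ rest := by
  induction L generalizing rest with
  | nil => simp
  | cons a L ih => simp [List.foldl_cons, ih, List.reverse_cons, List.append_assoc]

lemma pv_nodup_length_le {s t : List String} (hs : s.Nodup) (hsub : s ⊆ t) :
    s.length ≤ t.length :=
  (List.subperm_of_subset hs hsub).length_le

lemma pv_length_lt {s t : List String} (hs : s.Nodup) (hsub : s ⊆ t)
    {x : String} (hxt : x ∈ t) (hxs : x ∉ s) : s.length < t.length := by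
  have h1 : (x :: s).Nodup := List.nodup_cons.mpr ⟨hxs, hs⟩
  have h2 : (x :: s) ⊆ t := by
    intro y hy; rcases List.mem_cons.mp hy with rfl | hy
    · exact hxt
    · exact hsub hy
  have := pv_nodup_length_le h1 h2
  simpa using this

lemma pv_contains_add (s : PySem.Set String) (x y : String) :
    PySem.Set.contains (PySem.Set.add s x) y = (PySem.Set.contains s y || y == x) := by
  apply Bool.eq_iff_iff.mpr
  simp [PySem.Set.mem_add, beq_iff_eq]

-- growth shape of Set.add / Set.update / satStep (the saturation only appends)
lemma pv_foldl_ext {β : Type} (f : PySem.Set String → β → PySem.Set String)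
    (hf : ∀ s b, ∃ e, f s b = s ++ e) (l : List β) :
    ∀ s, ∃ e, l.foldl f s = s ++ e := by
  induction l with
  | nil => intro s; exact ⟨[], by simp⟩
  | cons b l ih =>
    intro s
    obtain ⟨e1, he1⟩ := hf s b
    obtain ⟨e2, he2⟩ := ih (f s b)
    exact ⟨e1 ++ e2, by rw [List.foldl_cons, he2, he1, List.append_assoc]⟩

lemma pv_add_ext (s : PySem.Set String) (x : String) : ∃ e, PySem.Set.add s x = s ++ e := by
  by_cases h : x ∈ s
  · exact ⟨[], by simp [PySem.Set.add, h]⟩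
  · exact ⟨[x], by simp [PySem.Set.add, h]⟩

lemma pv_update_ext (s : PySem.Set String) (xs : List String) :
    ∃ e, PySem.Set.update s xs = s ++ e := by
  have : ∀ t, ∃ e, PySem.Set.update t xs = t ++ e := by
    intro t
    have := pv_foldl_ext (fun s x => PySem.Set.add s x) pv_add_ext xs t
    simpa [PySem.Set.update] using this
  exact this s

lemma pv_satStep_ext (pd : PySem.Dict String (PySem.Set String)) (S : PySem.Set String) :
    ∃ e, pvSatStep pd S = S ++ e :=
  pv_foldl_ext _ (fun s v => pv_update_ext s (pvP pd v)) S S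

lemma pv_sub_satStep (pd : PySem.Dict String (PySem.Set String)) (S : PySem.Set String) :
    S ⊆ pvSatStep pd S := by
  obtain ⟨e, he⟩ := pv_satStep_ext pd S
  rw [he]; exact List.subset_append_left _ _

-- membership in one saturation round
lemma pv_mem_foldl_update (pd : PySem.Dict String (PySem.Set String)) (l : List String) :
    ∀ (acc : PySem.Set String) (x : String),
      x ∈ l.foldl (fun acc v => PySem.Set.update acc (pvP pd v)) acc ↔
        x ∈ acc ∨ ∃ v ∈ l, x ∈ pvP pd v := by
  induction l with
  | nil => simp
  | cons a l ih =>
    intro acc x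
    rw [List.foldl_cons, ih]
    simp [PySem.Set.mem_update]
    tauto

lemma pv_mem_satStep (pd : PySem.Dict String (PySem.Set String)) (S : PySem.Set String)
    (x : String) : x ∈ pvSatStep pd S ↔ x ∈ S ∨ ∃ v ∈ S, x ∈ pvP pd v :=
  pv_mem_foldl_update pd S S x

lemma pv_nodup_satStep (pd : PySem.Dict String (PySem.Set String)) {S : PySem.Set String}
    (h : S.Nodup) : (pvSatStep pd S).Nodup := by
  unfold pvSatStep
  have : ∀ (l : List String) (acc : PySem.Set String), acc.Nodup →
      (l.foldl (fun acc v => PySem.Set.update acc (pvP pd v)) acc).Nodup := by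
    intro l
    induction l with
    | nil => intro acc h; simpa using h
    | cons a l ih => intro acc hacc; exact ih _ (PySem.Set.nodup_update _ _ hacc)
  exact this S S h

-- pvSat basics
lemma pv_sub_sat (pd : PySem.Dict String (PySem.Set String)) (n : Nat) :
    ∀ S : PySem.Set String, S ⊆ pvSat pd n S := by
  induction n with
  | zero => intro S; simp [pvSat]
  | succ n ih =>
    intro S
    exact fun x hx => by
      simp only [pvSat]
      exact ih (pvSatStep pd S) (pv_sub_satStep pd S hx)

lemma pv_nodup_sat (pd : PySem.Dict String (PySem.Set String)) (n : Nat) :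
    ∀ {S : PySem.Set String}, S.Nodup → (pvSat pd n S).Nodup := by
  induction n with
  | zero => intro S h; simpa [pvSat] using h
  | succ n ih => intro S h; simp only [pvSat]; exact ih (pv_nodup_satStep pd h)

lemma pv_sat_sub (pd : PySem.Dict String (PySem.Set String)) {U : List String}
    (hP : ∀ v x, x ∈ pvP pd v → x ∈ U) (n : Nat) :
    ∀ {S : PySem.Set String}, S ⊆ U → pvSat pd n S ⊆ U := by
  induction n with
  | zero => intro S h; simpa [pvSat] using h
  | succ n ih =>
    intro S h
    simp only [pvSat]
    apply ih
    intro x hx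
    rcases (pv_mem_satStep pd S x).mp hx with hx | ⟨v, _, hx⟩
    · exact h hx
    · exact hP v x hx

lemma pv_sat_sound (pd : PySem.Dict String (PySem.Set String)) (t : String) (n : Nat) :
    ∀ {S : PySem.Set String}, (∀ w ∈ S, pvReach pd w t) → ∀ w ∈ pvSat pd n S, pvReach pd w t := by
  induction n with
  | zero => intro S h; simpa [pvSat] using h
  | succ n ih =>
    intro S h
    simp only [pvSat]
    apply ih
    intro w hw
    rcases (pv_mem_satStep pd S w).mp hw with hw | ⟨v, hv, hw⟩
    · exact h w hw
    · exact pvReach.step hw (h v hv)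

lemma pv_sat_fix (pd : PySem.Dict String (PySem.Set String)) {S : PySem.Set String}
    (h : pvSatStep pd S = S) (n : Nat) : pvSat pd n S = S := by
  induction n with
  | zero => simp [pvSat]
  | succ n ih => simp only [pvSat, h]; exact ih

lemma pv_sat_reaches_fix (pd : PySem.Dict String (PySem.Set String)) {U : List String}
    (hP : ∀ v x, x ∈ pvP pd v → x ∈ U) :
    ∀ (n : Nat) (S : PySem.Set String), S.Nodup → S ⊆ U →
      (PySem.Set.ofList U).length + 1 ≤ S.length + n →
      pvSatStep pd (pvSat pd n S) = pvSat pd n S := by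
  intro n
  induction n with
  | zero =>
    intro S hnd hsub hb
    have hle : S.length ≤ (PySem.Set.ofList U).length :=
      pv_nodup_length_le hnd (fun x hx => (PySem.Set.mem_ofList U x).mpr (hsub hx))
    omega
  | succ n ih =>
    intro S hnd hsub hb
    by_cases h : pvSatStep pd S = S
    · have hfix : pvSat pd (n + 1) S = S := by
        simp only [pvSat, h]; exact pv_sat_fix pd h n
      rw [hfix]; exact h
    · obtain ⟨e, he⟩ := pv_satStep_ext pd S
      have hne : e ≠ [] := by
        intro h0; exact h (by rw [he, h0, List.append_nil])
      have hlen : S.length + 1 ≤ (pvSatStep pd S).length := by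
        rw [he, List.length_append]
        have : 0 < e.length := List.length_pos_iff.mpr hne
        omega
      have hsub' : pvSatStep pd S ⊆ U := by
        intro x hx
        rcases (pv_mem_satStep pd S x).mp hx with hx | ⟨v, _, hx⟩
        · exact hsub hx
        · exact hP v x hx
      have := ih (pvSatStep pd S) (pv_nodup_satStep pd hnd) hsub' (by omega)
      simpa only [pvSat] using this

-- closure lemmas (with n = the length of the parent universe B, parents ⊆ B)
lemma pv_closure_refl (pd : PySem.Dict String (PySem.Set String)) (n : Nat) (v : String) :
    v ∈ pvClosure pd n v :=
  pv_sub_sat pd (n + 1) [v] (by simp)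

lemma pv_closure_nodup (pd : PySem.Dict String (PySem.Set String)) (n : Nat) (v : String) :
    (pvClosure pd n v).Nodup :=
  pv_nodup_sat pd (n + 1) (by simp)

lemma pv_closure_sound (pd : PySem.Dict String (PySem.Set String)) (n : Nat) {v w : String}
    (h : w ∈ pvClosure pd n v) : pvReach pd w v := by
  refine pv_sat_sound pd v (n + 1) ?_ w h
  intro x hx
  simp at hx
  subst hx
  exact pvReach.refl _

lemma pv_closure_subU (pd : PySem.Dict String (PySem.Set String)) {B : List String}
    (hP : ∀ v x, x ∈ pvP pd v → x ∈ B) (v : String) :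
    pvClosure pd B.length v ⊆ v :: B := by
  apply pv_sat_sub pd (fun w x hx => List.mem_cons_of_mem v (hP w x hx))
  simp

lemma pv_closure_closed (pd : PySem.Dict String (PySem.Set String)) {B : List String}
    (hP : ∀ v x, x ∈ pvP pd v → x ∈ B) (v : String) :
    ∀ x ∈ pvClosure pd B.length v, ∀ u ∈ pvP pd x, u ∈ pvClosure pd B.length v := by
  have hP' : ∀ w x, x ∈ pvP pd w → x ∈ v :: B :=
    fun w x hx => List.mem_cons_of_mem v (hP w x hx)
  have hfix : pvSatStep pd (pvClosure pd B.length v) = pvClosure pd B.length v := by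
    have hsub : [v] ⊆ v :: B := by intro x hx; simp at hx; simp [hx]
    have hlen : (PySem.Set.ofList (v :: B)).length + 1 ≤ ([v] : List String).length + (B.length + 1) := by
      have := PySem.Set.length_ofList_le (v :: B)
      simp at this ⊢
      omega
    exact pv_sat_reaches_fix pd hP' (B.length + 1) [v] (by simp) hsub hlen
  intro x hx u hu
  rw [← hfix]
  exact (pv_mem_satStep pd _ u).mpr (Or.inr ⟨x, hx, hu⟩)

lemma pv_closure_complete (pd : PySem.Dict String (PySem.Set String)) {B : List String}
    (hP : ∀ v x, x ∈ pvP pd v → x ∈ B) {v w : String}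
    (h : pvReach pd w v) : w ∈ pvClosure pd B.length v :=
  pv_reach_closed (pv_closure_closed pd hP v) h (pv_closure_refl pd B.length v)

lemma pv_closure_mono_edge (pd : PySem.Dict String (PySem.Set String)) {B : List String}
    (hP : ∀ v x, x ∈ pvP pd v → x ∈ B) {u v : String} (hu : u ∈ pvP pd v) :
    pvClosure pd B.length u ⊆ pvClosure pd B.length v := by
  intro w hw
  exact pv_closure_complete pd hP (pv_reach_snoc (pv_closure_sound pd B.length hw) hu)

-- the dict builders: getD gives exactly the set of edge sources/targets
lemma pv_parentB_getD_aux (ps : List (String × String)) (v : String) :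
    ∀ d : PySem.Dict String (PySem.Set String),
      (ps.foldl (fun d p => d.modify p.2 [] (fun s => PySem.Set.add s p.1)) d).getD v [] =
        PySem.Set.update (d.getD v []) ((ps.filter (fun p => p.2 == v)).map (fun p => p.1)) := by
  induction ps with
  | nil => intro d; simp [PySem.Set.update]
  | cons p ps ih =>
    intro d
    rw [List.foldl_cons, ih]
    by_cases h : p.2 = v
    · subst h
      simp [PySem.Set.update]
    · simp [Ne.symm h, h, PySem.Dict.getD_modify]

lemma pv_getD_empty (v : String) :
    (PySem.Dict.empty : PySem.Dict String (PySem.Set String)).getD v [] = [] := by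
  simp [pysem]

lemma pv_parentB_getD (ps : List (String × String)) (v : String) :
    pvP (pvParentB ps) v =
      PySem.Set.ofList ((ps.filter (fun p => p.2 == v)).map (fun p => p.1)) := by
  unfold pvP pvParentB
  rw [pv_parentB_getD_aux, pv_getD_empty, PySem.Set.update_nil_left]

lemma pv_mem_P_parentB (ps : List (String × String)) (v u : String) :
    u ∈ pvP (pvParentB ps) v ↔ (u, v) ∈ ps := by
  rw [pv_parentB_getD, PySem.Set.mem_ofList]
  simp only [List.mem_map, List.mem_filter, beq_iff_eq]
  constructor
  · rintro ⟨p, ⟨hp, h2⟩, h1⟩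
    have : p = (u, v) := by
      cases p; simp at h1 h2; simp [h1, h2]
    rwa [this] at hp
  · intro h
    exact ⟨(u, v), ⟨h, rfl⟩, rfl⟩

lemma pv_nodup_P_parentB (ps : List (String × String)) (v : String) :
    (pvP (pvParentB ps) v).Nodup := by
  rw [pv_parentB_getD]; exact PySem.Set.nodup_ofList _

def pvGraphA (ps : List (String × String)) : PySem.Dict String (PySem.Set String) :=
  ps.foldl (fun d p => d.modify p.1 [] (fun s => PySem.Set.add s p.2)) PySem.Dict.empty

lemma pv_buildA_eq (ps : List (String × String)) :
    pvBuildA ps = (pvGraphA ps, pvParentB ps) := by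
  unfold pvBuildA pvGraphA pvParentB
  suffices h : ∀ d1 d2 : PySem.Dict String (PySem.Set String),
      ps.foldl (fun gp p =>
        (gp.1.modify p.1 [] (fun s => PySem.Set.add s p.2),
         gp.2.modify p.2 [] (fun s => PySem.Set.add s p.1))) (d1, d2) =
      (ps.foldl (fun d p => d.modify p.1 [] (fun s => PySem.Set.add s p.2)) d1,
       ps.foldl (fun d p => d.modify p.2 [] (fun s => PySem.Set.add s p.1)) d2) by
    exact h _ _
  induction ps with
  | nil => intro d1 d2; rfl
  | cons p ps ih => intro d1 d2; rw [List.foldl_cons, ih]; rfl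

lemma pv_graphA_getD_aux (ps : List (String × String)) (v : String) :
    ∀ d : PySem.Dict String (PySem.Set String),
      (ps.foldl (fun d p => d.modify p.1 [] (fun s => PySem.Set.add s p.2)) d).getD v [] =
        PySem.Set.update (d.getD v []) ((ps.filter (fun p => p.1 == v)).map (fun p => p.2)) := by
  induction ps with
  | nil => intro d; simp [PySem.Set.update]
  | cons p ps ih =>
    intro d
    rw [List.foldl_cons, ih]
    by_cases h : p.1 = v
    · subst h
      simp [PySem.Set.update]
    · simp [Ne.symm h, h, PySem.Dict.getD_modify]

lemma pv_graphA_getD (ps : List (String × String)) (v : String) :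
    pvP (pvGraphA ps) v =
      PySem.Set.ofList ((ps.filter (fun p => p.1 == v)).map (fun p => p.2)) := by
  unfold pvP pvGraphA
  rw [pv_graphA_getD_aux, pv_getD_empty, PySem.Set.update_nil_left]

lemma pv_mem_P_graphA (ps : List (String × String)) (u w : String) :
    w ∈ pvP (pvGraphA ps) u ↔ (u, w) ∈ ps := by
  rw [pv_graphA_getD, PySem.Set.mem_ofList]
  simp only [List.mem_map, List.mem_filter, beq_iff_eq]
  constructor
  · rintro ⟨p, ⟨hp, h1⟩, h2⟩
    have : p = (u, w) := by
      cases p; simp at h1 h2; simp [h1, h2]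
    rwa [this] at hp
  · intro h
    exact ⟨(u, w), ⟨h, rfl⟩, rfl⟩

lemma pv_nodup_P_graphA (ps : List (String × String)) (u : String) :
    (pvP (pvGraphA ps) u).Nodup := by
  rw [pv_graphA_getD]; exact PySem.Set.nodup_ofList _

lemma pv_edge_mem_chars {s1 s2 : String} {u v : String} (h : (u, v) ∈ pvPairs s1 s2) :
    u ∈ pvChars s1 := by
  unfold pvPairs at h
  exact (List.of_mem_zip h).1

-- ===== B's DFS computes exactly the ancestors of k =====
lemma pv_dfs_fold_spec (L : List String) :
    ∀ (st : List String) (sn : PySem.Set String), sn.Nodup →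
      let r := L.foldl (fun (ss : List String × PySem.Set String) c =>
          if PySem.Set.contains ss.2 c then ss else (c :: ss.1, PySem.Set.add ss.2 c)) (st, sn)
      (∀ v ∈ r.2, v ∈ sn ∨ v ∈ L) ∧ (∀ v ∈ r.1, v ∈ st ∨ v ∈ L) ∧
      st ⊆ r.1 ∧ sn ⊆ r.2 ∧ (∀ c ∈ L, c ∈ r.2) ∧ r.2.Nodup ∧
      (∀ v ∈ r.2, v ∈ sn ∨ v ∈ r.1) ∧
      r.1.length + sn.length = st.length + r.2.length := by
  induction L with
  | nil =>
    intro st sn hnd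
    exact ⟨fun v hv => Or.inl hv, fun v hv => Or.inl hv, fun v hv => hv, fun v hv => hv,
      fun c hc => absurd hc (List.not_mem_nil), hnd, fun v hv => Or.inl hv, rfl⟩
  | cons a L ih =>
    intro st sn hnd
    simp only [List.foldl_cons]
    by_cases h : PySem.Set.contains sn a = true
    · rw [if_pos h]
      have ha : a ∈ sn := (PySem.Set.contains_iff sn a).mp h
      obtain ⟨C1, C2, C3, C4, C5, C6, C7, C8⟩ := ih st sn hnd
      refine ⟨fun v hv => (C1 v hv).imp id (List.mem_cons_of_mem a),
        fun v hv => (C2 v hv).imp id (List.mem_cons_of_mem a), C3, C4, ?_, C6, C7, C8⟩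
      intro c hc
      rcases List.mem_cons.mp hc with rfl | hc
      · exact C4 ha
      · exact C5 c hc
    · rw [if_neg h]
      have ha : a ∉ sn := fun hm => h ((PySem.Set.contains_iff sn a).mpr hm)
      obtain ⟨C1, C2, C3, C4, C5, C6, C7, C8⟩ :=
        ih (a :: st) (PySem.Set.add sn a) (PySem.Set.nodup_add sn a hnd)
      have hadd : ∀ x, x ∈ PySem.Set.add sn a ↔ x ∈ sn ∨ x = a :=
        fun x => PySem.Set.mem_add sn a x
      refine ⟨?_, ?_, ?_, ?_, ?_, C6, ?_, ?_⟩
      · intro v hv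
        rcases C1 v hv with hv | hv
        · rcases (hadd v).mp hv with hv | rfl
          · exact Or.inl hv
          · exact Or.inr (List.mem_cons_self)
        · exact Or.inr (List.mem_cons_of_mem a hv)
      · intro v hv
        rcases C2 v hv with hv | hv
        · rcases List.mem_cons.mp hv with rfl | hv
          · exact Or.inr (List.mem_cons_self)
          · exact Or.inl hv
        · exact Or.inr (List.mem_cons_of_mem a hv)
      · exact fun v hv => C3 (List.mem_cons_of_mem a hv)
      · exact fun v hv => C4 ((hadd v).mpr (Or.inl hv))
      · intro c hc
        rcases List.mem_cons.mp hc with rfl | hc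
        · exact C4 ((hadd c).mpr (Or.inr rfl))
        · exact C5 c hc
      · intro v hv
        rcases C7 v hv with hv | hv
        · rcases (hadd v).mp hv with hv | rfl
          · exact Or.inl hv
          · exact Or.inr (C3 List.mem_cons_self)
        · exact Or.inr hv
      · have hlen : (PySem.Set.add sn a).length = sn.length + 1 := by
          simp [PySem.Set.add, ha]
        simp only [List.length_cons] at C8
        omega

lemma pv_dfs_spec (pd : PySem.Dict String (PySem.Set String)) {U : List String}
    (hP : ∀ v x, x ∈ pvP pd v → x ∈ U) (t : String) :
    ∀ (f : Nat) (stack : List String) (seen : PySem.Set String), seen.Nodup →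
      (∀ v ∈ stack, v ∈ seen) → seen ⊆ U →
      (∀ v ∈ seen, pvReach pd v t) →
      (∀ v ∈ seen, v ∈ stack ∨ ∀ c ∈ pvP pd v, c ∈ seen) →
      stack.length + (PySem.Set.ofList U).length < f + seen.length →
      (∀ v ∈ seen, v ∈ pvDfs pd f stack seen) ∧ (pvDfs pd f stack seen).Nodup ∧
      pvDfs pd f stack seen ⊆ U ∧ (∀ v ∈ pvDfs pd f stack seen, pvReach pd v t) ∧
      (∀ v ∈ pvDfs pd f stack seen, ∀ c ∈ pvP pd v, c ∈ pvDfs pd f stack seen) := by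
  intro f
  induction f with
  | zero =>
    intro stack seen hnd hss hsU hreach hW hf
    match stack with
    | [] =>
      refine ⟨fun v hv => hv, hnd, hsU, hreach, ?_⟩
      intro v hv c hc
      rcases hW v hv with hv' | hcl
      · exact absurd hv' (List.not_mem_nil)
      · exact hcl c hc
    | cur :: rest =>
      have : seen.length ≤ (PySem.Set.ofList U).length :=
        pv_nodup_length_le hnd (fun x hx => (PySem.Set.mem_ofList U x).mpr (hsU hx))
      simp only [List.length_cons] at hf
      omega
  | succ f ih =>
    intro stack seen hnd hss hsU hreach hW hf
    match stack with
    | [] =>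
      refine ⟨fun v hv => hv, hnd, hsU, hreach, ?_⟩
      intro v hv c hc
      rcases hW v hv with hv' | hcl
      · exact absurd hv' (List.not_mem_nil)
      · exact hcl c hc
    | cur :: rest =>
      have hstep : pvDfs pd (f + 1) (cur :: rest) seen =
          pvDfs pd f ((pvP pd cur).foldl (fun (ss : List String × PySem.Set String) c =>
              if PySem.Set.contains ss.2 c then ss else (c :: ss.1, PySem.Set.add ss.2 c))
            (rest, seen)).1
          ((pvP pd cur).foldl (fun (ss : List String × PySem.Set String) c =>
              if PySem.Set.contains ss.2 c then ss else (c :: ss.1, PySem.Set.add ss.2 c))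
            (rest, seen)).2 := by
        simp only [pvDfs]
      obtain ⟨C1, C2, C3, C4, C5, C6, C7, C8⟩ := pv_dfs_fold_spec (pvP pd cur) rest seen hnd
      have hcur : cur ∈ seen := hss cur List.mem_cons_self
      set r := (pvP pd cur).foldl (fun (ss : List String × PySem.Set String) c =>
          if PySem.Set.contains ss.2 c then ss else (c :: ss.1, PySem.Set.add ss.2 c))
        (rest, seen) with hr
      have hss' : ∀ v ∈ r.1, v ∈ r.2 := by
        intro v hv
        rcases C2 v hv with hv | hv
        · exact C4 (hss v (List.mem_cons_of_mem cur hv))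
        · exact C5 v hv
      have hsU' : r.2 ⊆ U := by
        intro x hx
        rcases C1 x hx with hx | hx
        · exact hsU hx
        · exact hP cur x hx
      have hreach' : ∀ v ∈ r.2, pvReach pd v t := by
        intro v hv
        rcases C1 v hv with hv | hv
        · exact hreach v hv
        · exact pvReach.step hv (hreach cur hcur)
      have hW' : ∀ v ∈ r.2, v ∈ r.1 ∨ ∀ c ∈ pvP pd v, c ∈ r.2 := by
        intro v hv
        rcases C7 v hv with hv' | hv'
        · rcases hW v hv' with hst | hcl
          · rcases List.mem_cons.mp hst with rfl | hst
            · exact Or.inr (fun c hc => C5 c hc)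
            · exact Or.inl (C3 hst)
          · exact Or.inr (fun c hc => C4 (hcl c hc))
        · exact Or.inl hv'
      have hf' : r.1.length + (PySem.Set.ofList U).length < f + r.2.length := by
        simp only [List.length_cons] at hf
        omega
      obtain ⟨D1, D2, D3, D4, D5⟩ := ih r.1 r.2 C6 hss' hsU' hreach' hW' hf'
      rw [hstep]
      exact ⟨fun v hv => D1 v (C4 hv), D2, D3, D4, D5⟩

-- ===== A's first while loop: road = ancestors of k, p = its parentless nodes =====
lemma pv_findLoop_spec1 (pd : PySem.Dict String (PySem.Set String)) (t : String) :
    ∀ (f : Nat) (find : List String) (road p : PySem.Set String),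
      (∀ v ∈ find, pvReach pd v t) → (∀ v ∈ road, pvReach pd v t) →
      (∀ v, v ∈ p ↔ v ∈ road ∧ pvP pd v = []) → road.Nodup → p.Nodup →
      let rp := pvFindLoop pd f find road p
      (∀ v ∈ rp.1, pvReach pd v t) ∧ (∀ v, v ∈ rp.2 ↔ v ∈ rp.1 ∧ pvP pd v = []) ∧
      rp.1.Nodup ∧ rp.2.Nodup := by
  intro f
  induction f with
  | zero =>
    intro find road p hfind hroad hp hnd1 hnd2
    match find with
    | [] => exact ⟨hroad, fun v => hp v, hnd1, hnd2⟩
    | cur :: rest => exact ⟨hroad, fun v => hp v, hnd1, hnd2⟩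
  | succ f ih =>
    intro find road p hfind hroad hp hnd1 hnd2
    match find with
    | [] => exact ⟨hroad, fun v => hp v, hnd1, hnd2⟩
    | cur :: rest =>
      have hcur : pvReach pd cur t := hfind cur List.mem_cons_self
      have hstep : pvFindLoop pd (f + 1) (cur :: rest) road p =
          pvFindLoop pd f ((pvP pd cur).foldl (fun st c => c :: st) rest)
            (PySem.Set.add road cur)
            (if (pvP pd cur).length == 0 then PySem.Set.add p cur else p) := by
        simp only [pvFindLoop]
      rw [hstep]
      apply ih
      · intro v hv
        rw [pv_foldl_cons_eq, List.mem_append, List.mem_reverse] at hv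
        rcases hv with hv | hv
        · exact pvReach.step hv hcur
        · exact hfind v (List.mem_cons_of_mem cur hv)
      · intro v hv
        rcases (PySem.Set.mem_add road cur v).mp hv with hv | rfl
        · exact hroad v hv
        · exact hcur
      · intro v
        by_cases h : pvP pd cur = []
        · simp only [h, List.length_nil, beq_self_eq_true, if_true]
          rw [PySem.Set.mem_add, PySem.Set.mem_add, hp v]
          constructor
          · rintro (⟨hv, he⟩ | rfl)
            · exact ⟨Or.inl hv, he⟩
            · exact ⟨Or.inr rfl, h⟩
          · rintro ⟨hv | rfl, he⟩
            · exact Or.inl ⟨hv, he⟩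
            · exact Or.inr rfl
        · have hlen : ((pvP pd cur).length == 0) = false := by
            simp [List.length_eq_zero_iff, h]
          rw [hlen]
          simp only [Bool.false_eq_true, if_false]
          rw [PySem.Set.mem_add, hp v]
          constructor
          · rintro ⟨hv, he⟩
            exact ⟨Or.inl hv, he⟩
          · rintro ⟨hv | rfl, he⟩
            · exact ⟨hv, he⟩
            · exact absurd he h
      · exact PySem.Set.nodup_add road cur hnd1
      · by_cases h : pvP pd cur = []
        · simp only [h, List.length_nil, beq_self_eq_true, if_true]
          exact PySem.Set.nodup_add p cur hnd2
        · have hlen : ((pvP pd cur).length == 0) = false := by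
            simp [List.length_eq_zero_iff, h]
          rw [hlen]
          simp only [Bool.false_eq_true, if_false]
          exact hnd2

lemma pv_findLoop_spec2 (pd : PySem.Dict String (PySem.Set String)) {B : List String}
    (hP : ∀ v x, x ∈ pvP pd v → x ∈ B) (hnd : ∀ v, (pvP pd v).Nodup) (t : String)
    (hacyc : ∀ v, pvReach pd v t → ∀ u ∈ pvP pd v, v ∉ pvClosure pd B.length u) :
    ∀ (f : Nat) (find : List String) (road p : PySem.Set String),
      (∀ v ∈ find, pvReach pd v t) →
      (find.map (fun v => (B.length + 1) ^ (pvClosure pd B.length v).length)).sum < f →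
      ∀ x, (x ∈ road ∨ ∃ u ∈ find, pvReach pd x u) → x ∈ (pvFindLoop pd f find road p).1 := by
  intro f
  induction f with
  | zero =>
    intro find road p hfind hsum x hx
    omega
  | succ f ih =>
    intro find road p hfind hsum x hx
    match find with
    | [] =>
      rcases hx with hx | ⟨u, hu, _⟩
      · simpa only [pvFindLoop] using hx
      · exact absurd hu (List.not_mem_nil)
    | cur :: rest =>
      have hcur : pvReach pd cur t := hfind cur List.mem_cons_self
      have hstep : pvFindLoop pd (f + 1) (cur :: rest) road p =
          pvFindLoop pd f ((pvP pd cur).foldl (fun st c => c :: st) rest)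
            (PySem.Set.add road cur)
            (if (pvP pd cur).length == 0 then PySem.Set.add p cur else p) := by
        simp only [pvFindLoop]
      rw [hstep]
      -- potential bookkeeping
      have hb1 : 1 ≤ B.length + 1 := by omega
      have hkey : ((pvP pd cur).map
          (fun v => (B.length + 1) ^ (pvClosure pd B.length v).length)).sum + 1 ≤
          (B.length + 1) ^ (pvClosure pd B.length cur).length := by
        have hmc : 1 ≤ (pvClosure pd B.length cur).length :=
          List.length_pos_of_mem (pv_closure_refl pd B.length cur)
        have hlt : ∀ u ∈ pvP pd cur,
            (pvClosure pd B.length u).length < (pvClosure pd B.length cur).length := by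
          intro u hu
          apply pv_length_lt (pv_closure_nodup pd B.length u)
            (pv_closure_mono_edge pd hP hu) (pv_closure_refl pd B.length cur)
          exact hacyc cur hcur u hu
        have hboundEl : ∀ y ∈ (pvP pd cur).map
            (fun v => (B.length + 1) ^ (pvClosure pd B.length v).length),
            y ≤ (B.length + 1) ^ ((pvClosure pd B.length cur).length - 1) := by
          intro y hy
          obtain ⟨u, hu, rfl⟩ := List.mem_map.mp hy
          exact Nat.pow_le_pow_right hb1 (by have := hlt u hu; omega)
        have hsumle := List.sum_le_card_nsmul _ _ hboundEl
        rw [List.length_map] at hsumle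
        have hcard : (pvP pd cur).length ≤ B.length :=
          pv_nodup_length_le (hnd cur) (fun x hx => hP cur x hx)
        have hx1 : 1 ≤ (B.length + 1) ^ ((pvClosure pd B.length cur).length - 1) :=
          Nat.one_le_pow _ _ (by omega)
        have hmul : (pvP pd cur).length • ((B.length + 1) ^ ((pvClosure pd B.length cur).length - 1)) =
            (pvP pd cur).length * ((B.length + 1) ^ ((pvClosure pd B.length cur).length - 1)) :=
          smul_eq_mul _ _
        have hpow : (B.length + 1) ^ (pvClosure pd B.length cur).length =
            (B.length + 1) ^ ((pvClosure pd B.length cur).length - 1) * (B.length + 1) := by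
          conv_lhs => rw [show (pvClosure pd B.length cur).length =
            ((pvClosure pd B.length cur).length - 1) + 1 by omega]
          rw [pow_succ]
        rw [hpow]
        have : (pvP pd cur).length * ((B.length + 1) ^ ((pvClosure pd B.length cur).length - 1)) ≤
            B.length * ((B.length + 1) ^ ((pvClosure pd B.length cur).length - 1)) :=
          Nat.mul_le_mul_right _ hcard
        nlinarith [hsumle, hmul]
      have hsum' : (((pvP pd cur).foldl (fun st c => c :: st) rest).map
          (fun v => (B.length + 1) ^ (pvClosure pd B.length v).length)).sum < f := by
        rw [pv_foldl_cons_eq, List.map_append, List.sum_append, List.map_reverse,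
          List.sum_reverse]
        simp only [List.map_cons, List.sum_cons] at hsum
        omega
      apply ih _ _ _ ?_ hsum'
      · -- transfer the completeness obligation
        rcases hx with hx | ⟨u, hu, hxu⟩
        · exact Or.inl ((PySem.Set.mem_add road cur x).mpr (Or.inl hx))
        · rcases List.mem_cons.mp hu with rfl | hu
          · rcases pv_reach_snoc_inv hxu with rfl | ⟨w, hw, hxw⟩
            · exact Or.inl ((PySem.Set.mem_add road x x).mpr (Or.inr rfl))
            · refine Or.inr ⟨w, ?_, hxw⟩
              rw [pv_foldl_cons_eq, List.mem_append, List.mem_reverse]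
              exact Or.inl hw
          · refine Or.inr ⟨u, ?_, hxu⟩
            rw [pv_foldl_cons_eq, List.mem_append, List.mem_reverse]
            exact Or.inr hu
      · intro v hv
        rw [pv_foldl_cons_eq, List.mem_append, List.mem_reverse] at hv
        rcases hv with hv | hv
        · exact pvReach.step hv hcur
        · exact hfind v (List.mem_cons_of_mem cur hv)

-- ===== the two selection loops produce the same path =====
-- readiness of a node (all its parents already visited)
def pvReady (pd : PySem.Dict String (PySem.Set String)) (k : String) (visit : PySem.Set String)
    (c : String) : Prop :=
  pvReach pd c k ∧ c ∉ visit ∧ ∀ g ∈ pvP pd c, g ∈ visit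

lemma pv_push_mem (q : List String) (c x : String) :
    x ∈ pvHeapPush q c ↔ x = c ∨ x ∈ q := by
  unfold pvHeapPush
  rw [(List.perm_orderedInsert _ c q).mem_iff, List.mem_cons]

lemma pv_push_nodup {q : List String} (c : String) (hn : q.Nodup) (hc : c ∉ q) :
    (pvHeapPush q c).Nodup := by
  unfold pvHeapPush
  exact (List.perm_orderedInsert _ c q).nodup_iff.mpr (List.nodup_cons.mpr ⟨hc, hn⟩)

lemma pv_push_pairwise {q : List String} (c : String) (hs : q.Pairwise (· ≤ ·)) :
    (pvHeapPush q c).Pairwise (· ≤ ·) := by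
  unfold pvHeapPush
  exact List.Pairwise.orderedInsert c q hs

lemma pv_fold_push_spec (cond : String → Bool) (L : List String) :
    ∀ q0 : List String, q0.Pairwise (· ≤ ·) → q0.Nodup → L.Nodup →
      (∀ c ∈ L, cond c = true → c ∉ q0) →
      let q' := L.foldl (fun qq c => if cond c then pvHeapPush qq c else qq) q0
      q'.Pairwise (· ≤ ·) ∧ q'.Nodup ∧
      (∀ x, x ∈ q' ↔ x ∈ q0 ∨ (x ∈ L ∧ cond x = true)) := by
  induction L with
  | nil =>
    intro q0 hs hn _ _
    exact ⟨hs, hn, fun x => by simp⟩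
  | cons c L ih =>
    intro q0 hs hn hLnd hdisj
    have hcL : c ∉ L := (List.nodup_cons.mp hLnd).1
    have hLnd' : L.Nodup := (List.nodup_cons.mp hLnd).2
    simp only [List.foldl_cons]
    by_cases hc : cond c = true
    · rw [if_pos hc]
      have hcq0 : c ∉ q0 := hdisj c List.mem_cons_self hc
      have hdisj' : ∀ d ∈ L, cond d = true → d ∉ pvHeapPush q0 c := by
        intro d hd hcd hmem
        rcases (pv_push_mem q0 c d).mp hmem with rfl | hmem
        · exact hcL hd
        · exact hdisj d (List.mem_cons_of_mem c hd) hcd hmem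
      obtain ⟨E1, E2, E3⟩ := ih (pvHeapPush q0 c) (pv_push_pairwise c hs)
        (pv_push_nodup c hn hcq0) hLnd' hdisj'
      refine ⟨E1, E2, ?_⟩
      intro x
      rw [E3 x, pv_push_mem]
      constructor
      · rintro ((rfl | hx) | ⟨hx, hcx⟩)
        · exact Or.inr ⟨List.mem_cons_self, hc⟩
        · exact Or.inl hx
        · exact Or.inr ⟨List.mem_cons_of_mem c hx, hcx⟩
      · rintro (hx | ⟨hx, hcx⟩)
        · exact Or.inl (Or.inr hx)
        · rcases List.mem_cons.mp hx with rfl | hx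
          · exact Or.inl (Or.inl rfl)
          · exact Or.inr ⟨hx, hcx⟩
    · rw [if_neg hc]
      obtain ⟨E1, E2, E3⟩ := ih q0 hs hn hLnd'
        (fun d hd hcd => hdisj d (List.mem_cons_of_mem c hd) hcd)
      refine ⟨E1, E2, ?_⟩
      intro x
      rw [E3 x]
      constructor
      · rintro (hx | ⟨hx, hcx⟩)
        · exact Or.inl hx
        · exact Or.inr ⟨List.mem_cons_of_mem c hx, hcx⟩
      · rintro (hx | ⟨hx, hcx⟩)
        · exact Or.inl hx
        · rcases List.mem_cons.mp hx with rfl | hx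
          · exact absurd hcx hc
          · exact Or.inr ⟨hx, hcx⟩

lemma pv_fold_push_all_spec (L : List String) :
    ∀ q0 : List String, q0.Pairwise (· ≤ ·) → q0.Nodup → L.Nodup → (∀ c ∈ L, c ∉ q0) →
      let q' := L.foldl (fun qq c => pvHeapPush qq c) q0
      q'.Pairwise (· ≤ ·) ∧ q'.Nodup ∧ (∀ x, x ∈ q' ↔ x ∈ q0 ∨ x ∈ L) := by
  induction L with
  | nil =>
    intro q0 hs hn _ _
    exact ⟨hs, hn, fun x => by simp⟩
  | cons c L ih =>
    intro q0 hs hn hLnd hdisj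
    have hcL : c ∉ L := (List.nodup_cons.mp hLnd).1
    have hcq0 : c ∉ q0 := hdisj c List.mem_cons_self
    simp only [List.foldl_cons]
    have hdisj' : ∀ d ∈ L, d ∉ pvHeapPush q0 c := by
      intro d hd hmem
      rcases (pv_push_mem q0 c d).mp hmem with rfl | hmem
      · exact hcL hd
      · exact hdisj d (List.mem_cons_of_mem c hd) hmem
    obtain ⟨E1, E2, E3⟩ := ih (pvHeapPush q0 c) (pv_push_pairwise c hs)
      (pv_push_nodup c hn hcq0) ((List.nodup_cons.mp hLnd).2) hdisj'
    refine ⟨E1, E2, ?_⟩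
    intro x
    rw [E3 x, pv_push_mem]
    constructor
    · rintro ((rfl | hx) | hx)
      · exact Or.inr List.mem_cons_self
      · exact Or.inl hx
      · exact Or.inr (List.mem_cons_of_mem c hx)
    · rintro (hx | hx)
      · exact Or.inl (Or.inr hx)
      · rcases List.mem_cons.mp hx with rfl | hx
        · exact Or.inl (Or.inl rfl)
        · exact Or.inr hx

lemma pv_sorted_nodup_eq {l1 l2 : List String} (h1 : l1.Pairwise (· ≤ ·))
    (h2 : l2.Pairwise (· ≤ ·)) (hn1 : l1.Nodup) (hn2 : l2.Nodup)
    (hm : ∀ x, x ∈ l1 ↔ x ∈ l2) : l1 = l2 := by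
  refine List.Perm.eq_of_pairwise (fun a b _ _ hab hba => le_antisymm hab hba) h1 h2 ?_
  exact (List.perm_ext_iff_of_nodup hn1 hn2).mpr hm

lemma pv_cnt_dec (order : List String) (hOrdN : order.Nodup) (visit : PySem.Set String)
    (cur : String) (hco : cur ∈ order) (hcv : cur ∉ visit) :
    (order.filter (fun c => !PySem.Set.contains (PySem.Set.add visit cur) c)).length + 1 =
      (order.filter (fun c => !PySem.Set.contains visit c)).length := by
  have hpred : ∀ c ∈ order, (!PySem.Set.contains (PySem.Set.add visit cur) c) =
      ((!(c == cur)) && !PySem.Set.contains visit c) := by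
    intro c _
    rw [pv_contains_add]
    cases h1 : PySem.Set.contains visit c <;> cases h2 : c == cur <;> simp [h1, h2]
  rw [List.filter_congr hpred, ← List.filter_filter]
  have hnd2 : (order.filter (fun c => !PySem.Set.contains visit c)).Nodup := hOrdN.filter _
  have hcur2 : cur ∈ order.filter (fun c => !PySem.Set.contains visit c) := by
    rw [List.mem_filter]
    exact ⟨hco, by simp [hcv, PySem.Set.contains_iff]⟩
  have herase := hnd2.erase_eq_filter cur
  have hfun : (fun (x : String) => x != cur) = (fun (x : String) => !(x == cur)) := by
    funext x; simp [bne]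
  rw [hfun] at herase
  rw [← herase, List.length_erase_of_mem hcur2]
  have := List.length_pos_of_mem hcur2
  omega

lemma pv_sim (gd pd : PySem.Dict String (PySem.Set String)) (roadA : PySem.Set String)
    (k : String) (order : List String)
    (hGP : ∀ u c, c ∈ pvP gd u ↔ u ∈ pvP pd c)
    (hGnd : ∀ u, (pvP gd u).Nodup)
    (hRoad : ∀ v, v ∈ roadA ↔ pvReach pd v k)
    (hOrdS : order.Pairwise (· ≤ ·)) (hOrdN : order.Nodup)
    (hOrdM : ∀ v, v ∈ order ↔ pvReach pd v k) :
    ∀ (f1 : Nat) (f2 : Nat) (q : List String) (visit : PySem.Set String) (path : List String),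
      q.Pairwise (· ≤ ·) → q.Nodup → (∀ c, c ∈ q ↔ pvReady pd k visit c) →
      (order.filter (fun c => !PySem.Set.contains visit c)).length < f1 →
      (order.filter (fun c => !PySem.Set.contains visit c)).length ≤ f2 →
      pvLoop2 gd pd roadA k f1 q visit path = pvScan pd k order f2 visit path := by
  intro f1
  induction f1 with
  | zero => intro f2 q visit path _ _ _ h1 _; omega
  | succ f1 ih =>
    intro f2 q visit path hqs hqn hqm h1 h2
    have hpred : ∀ c, ((!PySem.Set.contains visit c &&
        (pvP pd c).all (fun g => PySem.Set.contains visit g)) = true) ↔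
        (c ∉ visit ∧ ∀ g ∈ pvP pd c, g ∈ visit) := by
      intro c
      simp [List.all_eq_true, PySem.Set.contains_iff]
    cases q with
    | nil =>
      have hnone : order.find? (fun c => !PySem.Set.contains visit c &&
          (pvP pd c).all (fun g => PySem.Set.contains visit g)) = none := by
        apply List.find?_eq_none.mpr
        intro c hcord hc
        obtain ⟨hnv, hpar⟩ := (hpred c).mp hc
        exact absurd ((hqm c).mpr ⟨(hOrdM c).mp hcord, hnv, hpar⟩) (List.not_mem_nil)
      have hL : pvLoop2 gd pd roadA k (f1 + 1) [] visit path = path := by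
        simp only [pvLoop2]
      rw [hL]
      cases f2 with
      | zero => simp only [pvScan]
      | succ f2 => simp only [pvScan, hnone]
    | cons cur qrest =>
      obtain ⟨hcur_reach, hcur_nv, hcur_par⟩ := (hqm cur).mp List.mem_cons_self
      have hcur_ord : cur ∈ order := (hOrdM cur).mpr hcur_reach
      have hcur_filt : cur ∈ order.filter (fun c => !PySem.Set.contains visit c) := by
        rw [List.mem_filter]
        exact ⟨hcur_ord, by simp [hcur_nv, PySem.Set.contains_iff]⟩
      have hcnt_pos := List.length_pos_of_mem hcur_filt
      cases f2 with
      | zero => omega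
      | succ f2 =>
        have hfilter_eq : order.filter (fun c => !PySem.Set.contains visit c &&
            (pvP pd c).all (fun g => PySem.Set.contains visit g)) = cur :: qrest := by
          apply pv_sorted_nodup_eq (hOrdS.filter _) hqs (hOrdN.filter _) hqn
          intro x
          rw [List.mem_filter]
          constructor
          · rintro ⟨hxo, hx⟩
            obtain ⟨hnv, hpar⟩ := (hpred x).mp hx
            exact (hqm x).mpr ⟨(hOrdM x).mp hxo, hnv, hpar⟩
          · intro hx
            obtain ⟨hr, hnv, hpar⟩ := (hqm x).mp hx
            exact ⟨(hOrdM x).mpr hr, (hpred x).mpr ⟨hnv, hpar⟩⟩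
        have hfind : order.find? (fun c => !PySem.Set.contains visit c &&
            (pvP pd c).all (fun g => PySem.Set.contains visit g)) = some cur := by
          rw [← List.head?_filter, hfilter_eq]
          rfl
        have hLstep : pvLoop2 gd pd roadA k (f1 + 1) (cur :: qrest) visit path =
            if cur == k then path ++ [cur]
            else pvLoop2 gd pd roadA k f1
              ((pvP gd cur).foldl (fun qq c =>
                  if (!PySem.Set.contains (PySem.Set.add visit cur) c
                      && PySem.Set.contains roadA c)
                      && (pvP pd c).all (fun g => PySem.Set.contains (PySem.Set.add visit cur) g)
                  then pvHeapPush qq c else qq) qrest)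
              (PySem.Set.add visit cur) (path ++ [cur]) := by
          simp only [pvLoop2]
        have hSstep : pvScan pd k order (f2 + 1) visit path =
            if cur == k then path ++ [cur]
            else pvScan pd k order f2 (PySem.Set.add visit cur) (path ++ [cur]) := by
          simp only [pvScan, hfind]
        rw [hLstep, hSstep]
        by_cases hk : cur = k
        · rw [if_pos (by simp [hk]), if_pos (by simp [hk])]
        · rw [if_neg (by simp [hk]), if_neg (by simp [hk])]
          have hcur_not_qrest : cur ∉ qrest := (List.nodup_cons.mp hqn).1
          have hcond : ∀ c, ((!PySem.Set.contains (PySem.Set.add visit cur) c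
              && PySem.Set.contains roadA c)
              && (pvP pd c).all (fun g => PySem.Set.contains (PySem.Set.add visit cur) g)) = true ↔
              pvReady pd k (PySem.Set.add visit cur) c := by
            intro c
            unfold pvReady
            simp only [Bool.and_eq_true, Bool.not_eq_true', Bool.eq_false_iff, Ne,
              List.all_eq_true, PySem.Set.contains_iff, hRoad c]
            tauto
          have hdisj : ∀ c ∈ pvP gd cur,
              ((!PySem.Set.contains (PySem.Set.add visit cur) c
                && PySem.Set.contains roadA c)
                && (pvP pd c).all (fun g => PySem.Set.contains (PySem.Set.add visit cur) g)) = true →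
              c ∉ qrest := by
            intro c hcG _ hcq
            obtain ⟨_, _, hpar⟩ := (hqm c).mp (List.mem_cons_of_mem _ hcq)
            exact hcur_nv (hpar cur ((hGP cur c).mp hcG))
          obtain ⟨E1, E2, E3⟩ := pv_fold_push_spec _ (pvP gd cur) qrest
            (List.Pairwise.of_cons hqs) ((List.nodup_cons.mp hqn).2) (hGnd cur) hdisj
          have hqm' : ∀ c, c ∈ (pvP gd cur).foldl (fun qq c =>
              if (!PySem.Set.contains (PySem.Set.add visit cur) c
                  && PySem.Set.contains roadA c)
                  && (pvP pd c).all (fun g => PySem.Set.contains (PySem.Set.add visit cur) g)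
              then pvHeapPush qq c else qq) qrest ↔
              pvReady pd k (PySem.Set.add visit cur) c := by
            intro c
            rw [E3 c]
            constructor
            · rintro (hc | ⟨_, hcc⟩)
              · obtain ⟨hr, hnv, hpar⟩ := (hqm c).mp (List.mem_cons_of_mem _ hc)
                have hne : c ≠ cur := by rintro rfl; exact hcur_not_qrest hc
                refine ⟨hr, ?_, fun g hg => (PySem.Set.mem_add visit cur g).mpr (Or.inl (hpar g hg))⟩
                intro hmem
                rcases (PySem.Set.mem_add visit cur c).mp hmem with hmem | hmem
                · exact hnv hmem
                · exact hne hmem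
              · exact (hcond c).mp hcc
            · intro hcready
              obtain ⟨hr, hnv', hpar'⟩ := hcready
              by_cases hall : ∀ g ∈ pvP pd c, g ∈ visit
              · have hnv : c ∉ visit :=
                  fun hc => hnv' ((PySem.Set.mem_add visit cur c).mpr (Or.inl hc))
                have hcq : c ∈ cur :: qrest := (hqm c).mpr ⟨hr, hnv, hall⟩
                rcases List.mem_cons.mp hcq with rfl | hc
                · exact absurd ((PySem.Set.mem_add visit c c).mpr (Or.inr rfl)) hnv'
                · exact Or.inl hc
              · have hex : ∃ g ∈ pvP pd c, g ∉ visit := by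
                  by_contra hno
                  exact hall (fun g hg => by_contra fun hgn => hno ⟨g, hg, hgn⟩)
                obtain ⟨g, hg, hgnv⟩ := hex
                rcases (PySem.Set.mem_add visit cur g).mp (hpar' g hg) with hgv | rfl
                · exact absurd hgv hgnv
                · exact Or.inr ⟨(hGP g c).mpr hg, (hcond c).mpr ⟨hr, hnv', hpar'⟩⟩
          have hdec := pv_cnt_dec order hOrdN visit cur hcur_ord hcur_nv
          exact ih f2 _ (PySem.Set.add visit cur) (path ++ [cur]) E1 E2 hqm'
            (by omega) (by omega)

-- ===== VERDICT (by name: the statement is the Claim_ definition above) =====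
theorem solution_spec : Claim_equal_solution := by
  intro s1 s2 k _ hpre
  unfold Pre_solution at hpre
  obtain ⟨hlen, hacy⟩ := hpre
  unfold Spec_solution
  -- abbreviations
  have hBn : (pvChars s1).length = s1.toList.length := by
    unfold pvChars; rw [List.length_map]
  have hP : ∀ v x, x ∈ pvP (pvParentB (pvPairs s1 s2)) v → x ∈ pvChars s1 :=
    fun v x hx => pv_edge_mem_chars ((pv_mem_P_parentB (pvPairs s1 s2) v x).mp hx)
  have hpnd := pv_nodup_P_parentB (pvPairs s1 s2)
  have hgnd := pv_nodup_P_graphA (pvPairs s1 s2)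
  have hGP : ∀ u c, c ∈ pvP (pvGraphA (pvPairs s1 s2)) u ↔ u ∈ pvP (pvParentB (pvPairs s1 s2)) c :=
    fun u c => by rw [pv_mem_P_graphA, pv_mem_P_parentB]
  rw [← hBn] at hacy
  -- normal forms of the two programs
  have hsolA : solution s1 s2 k =
      pvLoop2 (pvGraphA (pvPairs s1 s2)) (pvParentB (pvPairs s1 s2))
        (pvFindLoop (pvParentB (pvPairs s1 s2))
          ((s1.toList.length + 2) ^ (s1.toList.length + 2)) [k] [] []).1 k
        (s1.toList.length + 2)
        ((pvFindLoop (pvParentB (pvPairs s1 s2))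
          ((s1.toList.length + 2) ^ (s1.toList.length + 2)) [k] [] []).2.foldl
          (fun q c => pvHeapPush q c) []) [] [] := by
    unfold solution
    rw [pv_buildA_eq]
  have hsolB : solution_alt s1 s2 k =
      pvScan (pvParentB (pvPairs s1 s2)) k
        (PySem.List.sorted (pvDfs (pvParentB (pvPairs s1 s2)) (s1.toList.length + 2) [k]
          (PySem.Set.add PySem.Set.empty k)) (fun x => x) false)
        (PySem.List.sorted (pvDfs (pvParentB (pvPairs s1 s2)) (s1.toList.length + 2) [k]
          (PySem.Set.add PySem.Set.empty k)) (fun x => x) false).length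
        PySem.Set.empty [] := by
    unfold solution_alt
    rfl
  rw [hsolA, hsolB]
  have hadd_empty : PySem.Set.add PySem.Set.empty k = [k] := by
    simp [PySem.Set.add, PySem.Set.empty]
  rw [hadd_empty]
  have hempty : (PySem.Set.empty : PySem.Set String) = [] := rfl
  rw [hempty]
  -- the acyclicity hypothesis in ancestor form
  have hacyc : ∀ v, pvReach (pvParentB (pvPairs s1 s2)) v k →
      ∀ u ∈ pvP (pvParentB (pvPairs s1 s2)) v,
        v ∉ pvClosure (pvParentB (pvPairs s1 s2)) (pvChars s1).length u := by
    intro v hv u hu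
    exact hacy v (pv_closure_complete _ hP hv) u hu
  -- A's first loop
  have hkreach : ∀ v ∈ [k], pvReach (pvParentB (pvPairs s1 s2)) v k := by
    intro v hv
    simp at hv
    subst hv
    exact pvReach.refl _
  obtain ⟨hA_sound, hA_p, _, hA_pnd⟩ :=
    pv_findLoop_spec1 (pvParentB (pvPairs s1 s2)) k
      ((s1.toList.length + 2) ^ (s1.toList.length + 2)) [k] [] []
      hkreach (by simp) (by simp) (by simp) (by simp)
  have hsum : (([k].map (fun v => ((pvChars s1).length + 1) ^
      (pvClosure (pvParentB (pvPairs s1 s2)) (pvChars s1).length v).length)).sum) <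
      (s1.toList.length + 2) ^ (s1.toList.length + 2) := by
    have hmk : (pvClosure (pvParentB (pvPairs s1 s2)) (pvChars s1).length k).length ≤
        (pvChars s1).length + 1 := by
      have h1 := pv_nodup_length_le
        (pv_closure_nodup (pvParentB (pvPairs s1 s2)) (pvChars s1).length k)
        (pv_closure_subU (pvParentB (pvPairs s1 s2)) hP k)
      simpa using h1
    simp only [List.map_cons, List.map_nil, List.sum_cons, List.sum_nil, Nat.add_zero]
    calc ((pvChars s1).length + 1) ^
          (pvClosure (pvParentB (pvPairs s1 s2)) (pvChars s1).length k).length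
        ≤ ((pvChars s1).length + 1) ^ ((pvChars s1).length + 1) :=
          Nat.pow_le_pow_right (by omega) hmk
      _ ≤ ((pvChars s1).length + 2) ^ ((pvChars s1).length + 1) :=
          Nat.pow_le_pow_left (by omega) _
      _ < ((pvChars s1).length + 2) ^ ((pvChars s1).length + 2) := by
          apply Nat.pow_lt_pow_right (by omega) (by omega)
      _ = (s1.toList.length + 2) ^ (s1.toList.length + 2) := by rw [hBn]
  have hA_complete := pv_findLoop_spec2 (pvParentB (pvPairs s1 s2)) hP hpnd k hacyc
    ((s1.toList.length + 2) ^ (s1.toList.length + 2)) [k] [] [] hkreach hsum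
  have hRoadA : ∀ v, v ∈ (pvFindLoop (pvParentB (pvPairs s1 s2))
      ((s1.toList.length + 2) ^ (s1.toList.length + 2)) [k] [] []).1 ↔
      pvReach (pvParentB (pvPairs s1 s2)) v k := by
    intro v
    refine ⟨hA_sound v, fun hv => hA_complete v (Or.inr ⟨k, by simp, hv⟩)⟩
  -- B's DFS
  have hP' : ∀ v x, x ∈ pvP (pvParentB (pvPairs s1 s2)) v → x ∈ k :: pvChars s1 :=
    fun v x hx => List.mem_cons_of_mem k (hP v x hx)
  obtain ⟨hD_sub, hD_nd, hD_U, hD_reach, hD_closed⟩ :=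
    pv_dfs_spec (pvParentB (pvPairs s1 s2)) hP' k (s1.toList.length + 2) [k] [k]
      (by simp)
      (by intro v hv; exact hv)
      (by intro x hx; simp at hx; subst hx; exact List.mem_cons_self)
      (by intro v hv; simp at hv; subst hv; exact pvReach.refl _)
      (by intro v hv; exact Or.inl hv)
      (by
        have := PySem.Set.length_ofList_le (k :: pvChars s1)
        simp only [List.length_cons, List.length_nil] at this ⊢
        omega)
  have hRoadB : ∀ v, v ∈ pvDfs (pvParentB (pvPairs s1 s2)) (s1.toList.length + 2) [k] [k] ↔
      pvReach (pvParentB (pvPairs s1 s2)) v k := by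
    intro v
    refine ⟨hD_reach v, fun hv => pv_reach_closed hD_closed hv (hD_sub k (by simp))⟩
  -- the sorted ancestor list
  have hOrdPerm : (PySem.List.sorted (pvDfs (pvParentB (pvPairs s1 s2))
      (s1.toList.length + 2) [k] [k]) (fun x => x) false).Perm
      (pvDfs (pvParentB (pvPairs s1 s2)) (s1.toList.length + 2) [k] [k]) :=
    PySem.List.sorted_perm _ _ _
  have hOrdS : (PySem.List.sorted (pvDfs (pvParentB (pvPairs s1 s2))
      (s1.toList.length + 2) [k] [k]) (fun x => x) false).Pairwise (· ≤ ·) := by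
    have := PySem.List.sorted_pairwise (pvDfs (pvParentB (pvPairs s1 s2))
      (s1.toList.length + 2) [k] [k]) (fun x : String => x)
    simpa using this
  have hOrdN := hOrdPerm.nodup_iff.mpr hD_nd
  have hOrdM : ∀ v, v ∈ PySem.List.sorted (pvDfs (pvParentB (pvPairs s1 s2))
      (s1.toList.length + 2) [k] [k]) (fun x => x) false ↔
      pvReach (pvParentB (pvPairs s1 s2)) v k := by
    intro v
    rw [hOrdPerm.mem_iff]
    exact hRoadB v
  -- the initial queue of A
  obtain ⟨hq0s, hq0n, hq0m⟩ := pv_fold_push_all_spec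
    (pvFindLoop (pvParentB (pvPairs s1 s2))
      ((s1.toList.length + 2) ^ (s1.toList.length + 2)) [k] [] []).2 []
    (by simp) (by simp) hA_pnd (by simp)
  have hq0ready : ∀ c, c ∈ ((pvFindLoop (pvParentB (pvPairs s1 s2))
      ((s1.toList.length + 2) ^ (s1.toList.length + 2)) [k] [] []).2.foldl
      (fun q c => pvHeapPush q c) []) ↔
      pvReady (pvParentB (pvPairs s1 s2)) k [] c := by
    intro c
    rw [hq0m c]
    simp only [List.not_mem_nil, false_or]
    rw [hA_p c]
    unfold pvReady
    rw [hRoadA c]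
    constructor
    · rintro ⟨hr, he⟩
      exact ⟨hr, List.not_mem_nil, by rw [he]; intro g hg; exact absurd hg (List.not_mem_nil)⟩
    · rintro ⟨hr, _, hall⟩
      refine ⟨hr, List.eq_nil_iff_forall_not_mem.mpr ?_⟩
      intro g hg
      exact absurd (hall g hg) (List.not_mem_nil)
  -- counters
  have hfilt0 : ∀ (l : List String), l.filter (fun c => !PySem.Set.contains [] c) = l := by
    intro l
    apply List.filter_eq_self.mpr
    intro a _
    rfl
  have hordlen : (PySem.List.sorted (pvDfs (pvParentB (pvPairs s1 s2))
      (s1.toList.length + 2) [k] [k]) (fun x => x) false).length ≤ s1.toList.length + 1 := by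
    rw [hOrdPerm.length_eq]
    have h1 := pv_nodup_length_le hD_nd hD_U
    simp only [List.length_cons] at h1
    omega
  apply pv_sim _ _ _ _ _ hGP hgnd hRoadA hOrdS hOrdN hOrdM _ _ _ _ _ hq0s hq0n hq0ready
  · rw [hfilt0]
    omega
  · rw [hfilt0]
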